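-- pv_equiv track=rewrite | github.com/Grode23/Recommendation-Systems | main.py | get_favourites
-- ===== SOURCE A (Python) =====
-- def get_favourites(book_ratings, users, books):
--     # Dictionary with users' id (key) and their favourite books' ISBN and personal rating (value of list)
--     favourites = {}
--
--     for user in users:
--
--         user_id = user[0]
--
--         # Item in dictionary for every user
--         favourites[user_id] = []
--
--         # Iterate through every rating to find ratings from this specific user
--         for rating in book_ratings:
--
--             # If the rating is from this user
--             if user_id == rating[0]:
--
--                 # If the book exists
--                 if rating[1] in [i[0] for i in books]:
--
--                     to_be_inserted = [rating[1], rating[2]]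
--
--                     # Check if the user already has 3 favourites or not
--                     if len(favourites[user_id]) < 3:
--
--                         # If he doesn't, insert this one
--                         favourites[user_id].append(to_be_inserted)
--                     else:
--
--                         # if he does, go through these three
--                         for favourite in favourites[user_id]:
--
--                             # And check if the current rating is higher than a previous one
--                             if rating[2] > favourite[1]:
--                                 favourites[user_id].remove(favourite)
--                                 favourites[user_id].append(to_be_inserted)
--                                 break
--
--     return favourites
-- ===== SOURCE B (Python) =====
-- def get_favourites(book_ratings, users, books):
--     # One pass to build the valid-ISBN set and a per-user rating index, then for
--     # each user a fold over its pre-filtered ratings; the replacement is done by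
--     # a recursive rebuild (returning None when nothing is replaced) instead of
--     # A's scan + remove-by-value + append + break.
--     valid = {b[0] for b in books}
--
--     by_user = {}
--     for r in book_ratings:
--         by_user.setdefault(r[0], []).append(r)
--
--     def replace(favs, new):
--         # first favourite rated strictly below new gets dropped, new goes last;
--         # None if no favourite is rated below new
--         if not favs:
--             return None
--         if favs[0][1] < new[1]:
--             return favs[1:] + [new]
--         rest = replace(favs[1:], new)
--         return None if rest is None else [favs[0]] + rest
--
--     def pick(rows):
--         favs = []
--         for r in rows:
--             new = [r[1], r[2]]
--             if len(favs) < 3: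
--                 favs = favs + [new]
--             else:
--                 repl = replace(favs, new)
--                 if repl is not None:
--                     favs = repl
--         return favs
--
--     return {u[0]: pick([r for r in by_user.get(u[0], []) if r[1] in valid])
--             for u in users}
-- ===== Notes on version B (the rewrite author's own statement) =====
-- stated objective: faster
-- what changed: B builds the valid-ISBN set and a per-user rating index in one pass each, then computes every user's favourites by folding over that user's pre-filtered ratings, replacing a beaten favourite via a recursive rebuild that returns the new list (or None), instead of A's full rescan of book_ratings per user with the ISBN list rebuilt per rating and the scan/remove-by-value/append/break replacement.
-- outside the precondition, e.g. on get_favourites([[]], [], []): A returns {}, B raises IndexError; on get_favourites([['u1', 'b1', '5']], [], [['x'], []]): A returns {}, B raises IndexError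
import Mathlib
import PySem

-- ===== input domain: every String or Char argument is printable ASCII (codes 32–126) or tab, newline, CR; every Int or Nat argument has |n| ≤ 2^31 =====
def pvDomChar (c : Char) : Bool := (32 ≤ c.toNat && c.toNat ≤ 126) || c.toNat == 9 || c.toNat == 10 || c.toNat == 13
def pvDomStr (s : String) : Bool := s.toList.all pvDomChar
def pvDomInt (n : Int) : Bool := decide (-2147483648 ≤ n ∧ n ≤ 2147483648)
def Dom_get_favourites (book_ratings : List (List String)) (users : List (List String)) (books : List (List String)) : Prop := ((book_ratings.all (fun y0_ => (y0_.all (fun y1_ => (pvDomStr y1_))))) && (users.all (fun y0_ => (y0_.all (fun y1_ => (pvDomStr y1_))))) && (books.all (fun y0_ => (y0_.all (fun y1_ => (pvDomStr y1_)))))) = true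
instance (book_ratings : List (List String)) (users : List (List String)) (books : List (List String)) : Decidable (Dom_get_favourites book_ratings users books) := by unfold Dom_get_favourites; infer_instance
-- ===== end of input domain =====

-- B indexes ratings per user and the valid ISBNs once, then folds each user's
-- pre-filtered ratings, replacing a beaten favourite by a recursive rebuild
-- instead of A's per-user rescan with scan/remove-by-value/append/break (objective: faster).

-- ===== PORT A =====
-- row accesses user[0]/rating[i] via pyGetD; Pre_ guarantees the index is in
-- range on admitted inputs, so the default "" is never read
-- 'for favourite in favourites[user_id]: if rating[2] > favourite[1]: remove; append; break'
def pvFavLoopA (all rest : List (List String)) (isbn rat : String) : List (List String)  :=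
  match rest with
  | [] => all
  | f :: rest' =>
    if PySem.List.pyGetD f 1 "" < rat then
      ((PySem.List.remove? all f).getD all) ++ [[isbn, rat]]
    else pvFavLoopA all rest' isbn rat

-- 'if len(favourites[user_id]) < 3: append else: replacement loop'
def pvStepA (favs : List (List String)) (isbn rat : String) : List (List String) :=
  if favs.length < 3 then favs ++ [[isbn, rat]] else pvFavLoopA favs favs isbn rat

-- the inner 'for rating in book_ratings' loop for one user (the ISBN membership
-- list rebuilt for every matching rating, exactly as in A)
def pvUserFavsA (book_ratings : List (List String)) (books : List (List String)) (uid : String) : List (List String) :=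
  book_ratings.foldl (fun favs r =>
    if uid == PySem.List.pyGetD r 0 "" then
      if (books.map (fun i => PySem.List.pyGetD i 0 "")).contains (PySem.List.pyGetD r 1 "") then
        pvStepA favs (PySem.List.pyGetD r 1 "") (PySem.List.pyGetD r 2 "")
      else favs
    else favs) ([] : List (List String))

def get_favourites (book_ratings : List (List String)) (users : List (List String)) (books : List (List String)) : List (String × List (List String)) :=
  (users.foldl (fun d user =>
    d.insert (PySem.List.pyGetD user 0 "") (pvUserFavsA book_ratings books (PySem.List.pyGetD user 0 "")))
    (PySem.Dict.empty : PySem.Dict String (List (List String)))).items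

-- ===== PORT B =====
-- Source B's 'replace': recursive rebuild, none when no favourite is beaten
def pvReplaceB (favs : List (List String)) (nw : List String) : Option (List (List String)) :=
  match favs with
  | [] => none
  | f :: tl =>
    if PySem.List.pyGetD f 1 "" < PySem.List.pyGetD nw 1 "" then some (tl ++ [nw])
    else
      match pvReplaceB tl nw with
      | none => none
      | some l => some (f :: l)

-- Source B's 'pick': fold over the user's pre-filtered rows
def pvPickB (rows : List (List String)) : List (List String) :=
  rows.foldl (fun favs r =>
    let nw := [PySem.List.pyGetD r 1 "", PySem.List.pyGetD r 2 ""]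
    if favs.length < 3 then favs ++ [nw]
    else match pvReplaceB favs nw with
      | none => favs
      | some l => l) ([] : List (List String))

def get_favourites_alt (book_ratings : List (List String)) (users : List (List String)) (books : List (List String)) : List (String × List (List String)) :=
  -- valid = {b[0] for b in books}; by_user built once by setdefault/append;
  -- final dict comprehension over users
  let valid := PySem.Set.ofList (books.map (fun b => PySem.List.pyGetD b 0 ""))
  let byUser := book_ratings.foldl
    (fun d r => d.modify (PySem.List.pyGetD r 0 "") [] (· ++ [r]))
    (PySem.Dict.empty : PySem.Dict String (List (List String)))
  (users.foldl (fun d u =>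
      d.insert (PySem.List.pyGetD u 0 "")
        (pvPickB ((byUser.getD (PySem.List.pyGetD u 0 "") []).filter
          (fun r => valid.contains (PySem.List.pyGetD r 1 ""))))) PySem.Dict.empty).items

-- ===== PRECONDITION & SPEC =====
-- Pre_ excludes exactly the short rows one of the programs indexes past: empty user rows,
-- empty book rows (A raises when it reaches them, B's set comprehension always does — see cites),
-- empty rating rows, and rating rows of a listed user that lack the rating[1]/rating[2] field
-- the selection reads; on every such input the program that reaches the row raises IndexError.
def Pre_get_favourites (book_ratings : List (List String)) (users : List (List String)) (books : List (List String)) : Prop :=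
  (∀ u ∈ users, u ≠ []) ∧ (∀ b ∈ books, b ≠ []) ∧
  (∀ r ∈ book_ratings, r ≠ [] ∧
    ((∃ u ∈ users, u.headD "" = r.headD "") →
      2 ≤ r.length ∧ ((∃ b ∈ books, b.headD "" = r.getD 1 "") → 3 ≤ r.length)))
instance (book_ratings : List (List String)) (users : List (List String)) (books : List (List String)) : Decidable (Pre_get_favourites book_ratings users books) := by unfold Pre_get_favourites; infer_instance

def pvWitness_get_favourites : List (List String) × List (List String) × List (List String) :=
  ([["u1", "b1", "5"], ["u1", "b2", "7"], ["u2", "b1", "3"]], [["u1"], ["u2"]], [["b1"], ["b2"]])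

def Spec_get_favourites (book_ratings : List (List String)) (users : List (List String)) (books : List (List String)) (out : List (String × List (List String))) : Prop := out = get_favourites_alt book_ratings users books
instance (book_ratings : List (List String)) (users : List (List String)) (books : List (List String)) (out : List (String × List (List String))) : Decidable (Spec_get_favourites book_ratings users books out) := by unfold Spec_get_favourites; infer_instance

-- ===== CLAIM (what is proved, stated in full; the proofs are below) =====
def Claim_equal_get_favourites : Prop := ∀ (book_ratings : List (List String)) (users : List (List String)) (books : List (List String)), Dom_get_favourites book_ratings users books → Pre_get_favourites book_ratings users books → Spec_get_favourites book_ratings users books (get_favourites book_ratings users books)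

-- ===== LEMMAS AND PROOFS =====

-- removing the first occurrence of f from pre ++ f :: rest when f ∉ pre
theorem pv_remove_middle (pre rest : List (List String)) (f : List String) (h : f ∉ pre) :
    PySem.List.remove? (pre ++ f :: rest) f = some (pre ++ rest) := by
  induction pre with
  | nil => simp [PySem.List.remove?_cons_self]
  | cons g pre' ih =>
    have hg : g ≠ f := fun hgf => h (by simp [hgf])
    have : f ∉ pre' := fun hm => h (by simp [hm])
    rw [List.cons_append, PySem.List.remove?_cons_of_ne _ hg, ih this]
    simp

-- A's replacement scan over 'rest' within 'pre ++ rest' agrees with B's recursive rebuild,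
-- provided no element of 'pre' is beaten by the incoming rating
theorem pvFavLoop_eq_replace (rest pre : List (List String)) (isbn rat : String)
    (hpre : ∀ g ∈ pre, ¬ (PySem.List.pyGetD g 1 "" < rat)) :
    pvFavLoopA (pre ++ rest) rest isbn rat
      = match pvReplaceB rest [isbn, rat] with
        | none => pre ++ rest
        | some l => pre ++ l := by
  induction rest generalizing pre with
  | nil => simp [pvFavLoopA, pvReplaceB]
  | cons f rest' ih =>
    by_cases hc : PySem.List.pyGetD f 1 "" < rat
    · have hnw : PySem.List.pyGetD [isbn, rat] 1 "" = rat := by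
        simp [PySem.List.pyGetD, PySem.List.pyGet?, PySem.List.pyIdx?]
      have hf : f ∉ pre := fun hm => hpre f hm hc
      simp only [pvFavLoopA, pvReplaceB, hnw, if_pos hc, pv_remove_middle pre rest' f hf,
        Option.getD_some]
      simp
    · have hnw : PySem.List.pyGetD [isbn, rat] 1 "" = rat := by
        simp [PySem.List.pyGetD, PySem.List.pyGet?, PySem.List.pyIdx?]
      have hpre' : ∀ g ∈ pre ++ [f], ¬ (PySem.List.pyGetD g 1 "" < rat) := by
        intro g hg
        rcases List.mem_append.1 hg with h1 | h1
        · exact hpre g h1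
        · simp at h1; subst h1; exact hc
      have := ih (pre ++ [f]) hpre'
      simp only [List.append_assoc, List.singleton_append] at this
      simp only [pvFavLoopA, pvReplaceB, hnw, if_neg hc, this]
      cases pvReplaceB rest' [isbn, rat] <;> simp

-- the two per-rating steps agree
theorem pvStep_eq (favs : List (List String)) (isbn rat : String) :
    pvStepA favs isbn rat
      = (if favs.length < 3 then favs ++ [[isbn, rat]]
         else match pvReplaceB favs [isbn, rat] with
           | none => favs
           | some l => l) := by
  unfold pvStepA
  by_cases h : favs.length < 3
  · simp [h]
  · have := pvFavLoop_eq_replace favs [] isbn rat (by simp)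
    simp only [List.nil_append] at this
    simp only [if_neg h, this]

-- grouping: looking up uid in the per-user dict gives exactly the rows keyed by uid
theorem pvGroup_getD (l : List (List String)) (d : PySem.Dict String (List (List String))) (uid : String) :
    (l.foldl (fun d r => d.modify (PySem.List.pyGetD r 0 "") [] (· ++ [r])) d).getD uid []
      = d.getD uid [] ++ l.filter (fun r => PySem.List.pyGetD r 0 "" == uid) := by
  induction l generalizing d with
  | nil => simp
  | cons r l ih =>
    simp only [List.foldl_cons, ih, List.filter_cons]
    rw [PySem.Dict.getD_modify]
    by_cases h : PySem.List.pyGetD r 0 "" = uid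
    · simp [h]
    · rw [if_neg (fun h' => h h'.symm)]
      simp [h]

theorem pvUserFavs_eq (book_ratings books : List (List String)) (uid : String) :
    pvUserFavsA book_ratings books uid
      = pvPickB (((book_ratings.foldl
            (fun d r => d.modify (PySem.List.pyGetD r 0 "") [] (· ++ [r]))
            (PySem.Dict.empty : PySem.Dict String (List (List String)))).getD uid []).filter
          (fun r => (PySem.Set.ofList (books.map (fun b => PySem.List.pyGetD b 0 ""))).contains
            (PySem.List.pyGetD r 1 ""))) := by
  unfold pvUserFavsA pvPickB
  rw [pvGroup_getD]
  simp only [PySem.Dict.getD_empty, List.nil_append]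
  rw [PySem.List.foldl_if_eq_foldl_filter]
  have hfil : book_ratings.filter (fun r => uid == PySem.List.pyGetD r 0 "")
      = book_ratings.filter (fun r => PySem.List.pyGetD r 0 "" == uid) := by
    apply List.filter_congr; intro r _; simp [eq_comm]
  rw [← hfil]
  have hset : ∀ r : List String,
      (PySem.Set.ofList (books.map (fun b => PySem.List.pyGetD b 0 ""))).contains (PySem.List.pyGetD r 1 "")
        = (books.map (fun i => PySem.List.pyGetD i 0 "")).contains (PySem.List.pyGetD r 1 "") := by
    intro r; simp [PySem.Set.mem_ofList, PySem.Set.contains]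
  rw [show (fun r => (PySem.Set.ofList (books.map (fun b => PySem.List.pyGetD b 0 ""))).contains (PySem.List.pyGetD r 1 ""))
      = (fun r : List String => (books.map (fun i => PySem.List.pyGetD i 0 "")).contains (PySem.List.pyGetD r 1 "")) from funext hset]
  rw [PySem.List.foldl_if_eq_foldl_filter]
  apply PySem.List.foldl_congr_mem
  intro favs r _
  exact pvStep_eq favs (PySem.List.pyGetD r 1 "") (PySem.List.pyGetD r 2 "")

theorem get_favourites_eq (book_ratings users books : List (List String)) :
    get_favourites book_ratings users books = get_favourites_alt book_ratings users books := by
  unfold get_favourites get_favourites_alt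
  congr 1
  apply PySem.List.foldl_congr_mem
  intro d user _
  rw [pvUserFavs_eq]

-- ===== VERDICT (by name: the statement is the Claim_ definition above) =====
theorem get_favourites_spec : Claim_equal_get_favourites := by
  intro book_ratings users books _ _
  unfold Spec_get_favourites
  exact get_favourites_eq book_ratings users books
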